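-- pv_equiv track=rewrite | github.com/lcchiang/Artificial-Intelligence-Course | Lab 0/lab0.py | compute_string_properties
-- ===== SOURCE A (Python) =====
-- def compute_string_properties(string):
--     """Given a string of lowercase letters, returns a tuple containing the
--     following three elements:
--         0. The length of the string
--         1. A list of all the characters in the string (including duplicates, if
--            any), sorted in REVERSE alphabetical order
--         2. The number of distinct characters in the string (hint: use a set)
--     """
--     len_string = len(string)
--     list_char = []
--     distinct_char = 0
--     for char in string:
--         if char not in list_char:
--             distinct_char += 1
--         list_char.append(char)
--     return (len_string, sorted(list_char, reverse = True), distinct_char)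
-- ===== SOURCE B (Python) =====
-- def compute_string_properties(string):
--     counts = {}
--     for char in string:
--         counts[char] = counts.get(char, 0) + 1
--     result = []
--     for char in sorted(counts, reverse=True):
--         result.extend([char] * counts[char])
--     return (len(string), result, len(counts))
-- ===== Notes on version B (the rewrite author's own statement) =====
-- stated objective: faster
-- what changed: Replaces the O(n^2) membership-scan-plus-full-sort with a one-pass character frequency dict, distinct = number of keys, and the reverse-sorted list built by expanding the sorted distinct keys by their counts.
import Mathlib
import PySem

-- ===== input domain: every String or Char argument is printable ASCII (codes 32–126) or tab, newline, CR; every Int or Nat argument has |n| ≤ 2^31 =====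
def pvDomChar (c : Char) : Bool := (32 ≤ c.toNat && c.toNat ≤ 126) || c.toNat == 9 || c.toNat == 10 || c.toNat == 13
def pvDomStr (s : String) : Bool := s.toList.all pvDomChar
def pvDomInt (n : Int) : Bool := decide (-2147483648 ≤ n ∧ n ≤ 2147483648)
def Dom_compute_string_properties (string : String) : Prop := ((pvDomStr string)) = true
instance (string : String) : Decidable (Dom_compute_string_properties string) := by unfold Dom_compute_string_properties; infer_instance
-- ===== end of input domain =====

-- B replaces A's O(n^2) membership scan + full sort by a frequency dict and a count-then-expand over the sorted distinct keys (faster).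

-- ===== PORT A =====
-- iterating a Python string yields 1-char strings; membership/append/sort act on those strings
def compute_string_properties (string : String) : Int × List String × Int :=
  let len_string : Int := PySem.Str.len string
  let st := (string.toList.map (fun c => String.ofList [c])).foldl
      (fun (acc : List String × Int) ch =>
        (acc.1 ++ [ch], if acc.1.contains ch then acc.2 else acc.2 + 1))
      ([], 0)
  (len_string, PySem.List.sorted st.1 (fun x => x) true, st.2)

-- ===== PORT B =====
def compute_string_properties_alt (string : String) : Int × List String × Int :=
  let counts : PySem.Dict String Int :=
    (string.toList.map (fun c => String.ofList [c])).foldl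
      (fun d ch => d.insert ch (d.getD ch 0 + 1)) PySem.Dict.empty
  let result : List String :=
    (PySem.List.sorted counts.keys (fun x => x) true).foldl
      (fun acc ch => acc ++ List.replicate (counts.getD ch 0).toNat ch) []
  (PySem.Str.len string, result, (counts.size : Int))

-- ===== PRECONDITION & SPEC =====
def Spec_compute_string_properties (string : String) (out : Int × List String × Int) : Prop := out = compute_string_properties_alt string
instance (string : String) (out : Int × List String × Int) : Decidable (Spec_compute_string_properties string out) := by unfold Spec_compute_string_properties; infer_instance

-- ===== CLAIM (what is proved, stated in full; the proofs are below) =====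
def Claim_equal_compute_string_properties : Prop := ∀ (string : String), Dom_compute_string_properties string → Spec_compute_string_properties string (compute_string_properties string)

-- ===== LEMMAS AND PROOFS =====

-- A's loop: the accumulated list is p ++ L and the distinct counter counts the distinct elements seen
theorem pvA_loop_inv (L p : List String) (n : Int)
    (h : n = ((PySem.Set.ofList p).length : Int)) :
    L.foldl (fun (acc : List String × Int) ch =>
        (acc.1 ++ [ch], if acc.1.contains ch then acc.2 else acc.2 + 1)) (p, n)
      = (p ++ L, ((PySem.Set.ofList (p ++ L)).length : Int)) := by
  induction L generalizing p n with
  | nil => simp [h]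
  | cons ch L ih =>
    simp only [List.foldl_cons]
    have hadd : PySem.Set.ofList (p ++ [ch]) = PySem.Set.add (PySem.Set.ofList p) ch := by
      rw [PySem.Set.ofList_eq_foldl, PySem.Set.ofList_eq_foldl, List.foldl_append]
      rfl
    rw [ih (p ++ [ch]) _ ?_]
    · simp
    · rw [hadd, PySem.Set.add]
      by_cases hc : ch ∈ p
      · simp [PySem.Set.mem_ofList, hc, h]
      · simp [PySem.Set.mem_ofList, hc, h]

-- counts of an expansion over distinct keys
theorem pvCount_flatMap_replicate {α : Type} [DecidableEq α] (ks : List α) (f : α → Nat)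
    (hnd : ks.Nodup) (x : α) :
    (ks.flatMap (fun k => List.replicate (f k) k)).count x = if x ∈ ks then f x else 0 := by
  induction ks with
  | nil => simp
  | cons k ks ih =>
    simp only [List.flatMap_cons, List.count_append, List.nodup_cons] at *
    rw [ih hnd.2]
    by_cases hx : x = k
    · subst hx
      simp [hnd.1]
    · simp [List.count_replicate, hx, Ne.symm hx]

-- an expansion over strictly descending keys is weakly descending
theorem pvPairwise_flatMap_replicate {α : Type} [LinearOrder α] (ks : List α) (f : α → Nat)
    (hp : ks.Pairwise (fun a b => b < a)) :
    (ks.flatMap (fun k => List.replicate (f k) k)).Pairwise (fun a b => b ≤ a) := by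
  induction ks with
  | nil => simp
  | cons k ks ih =>
    rw [List.pairwise_cons] at hp
    rw [List.flatMap_cons, List.pairwise_append]
    refine ⟨List.pairwise_replicate.2 (Or.inr le_rfl), ih hp.2, ?_⟩
    intro a ha b hb
    obtain ⟨k2, hk2, hb2⟩ := List.mem_flatMap.1 hb
    rw [List.eq_of_mem_replicate ha, List.eq_of_mem_replicate hb2]
    exact le_of_lt (hp.1 k2 hk2)

-- the core identity: reverse-sorting a list = expanding its reverse-sorted distinct elements by their counts
theorem pvSorted_rev_eq_expand (L : List String) :
    PySem.List.sorted L (fun x => x) true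
      = (PySem.List.sorted (PySem.Set.ofList L) (fun x => x) true).foldl
          (fun acc ch => acc ++ List.replicate (L.count ch) ch) [] := by
  set ks := PySem.List.sorted (PySem.Set.ofList L) (fun x => x) true with hks
  rw [PySem.List.foldl_append_eq_flatMap]
  have hperm_ks : ks.Perm (PySem.Set.ofList L) := PySem.List.sorted_perm _ _ _
  have hnd : ks.Nodup := hperm_ks.nodup_iff.2 (PySem.Set.nodup_ofList L)
  have hpw : ks.Pairwise (fun a b => b ≤ a) := PySem.List.sorted_pairwise_rev _ _
  have hstrict : ks.Pairwise (fun a b => b < a) :=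
    (hpw.and hnd).imp (fun h => lt_of_le_of_ne h.1 (Ne.symm h.2))
  have hmemks : ∀ x, x ∈ ks ↔ x ∈ L := by
    intro x
    rw [hks, PySem.List.mem_sorted, PySem.Set.mem_ofList]
  have hpermE : (ks.flatMap (fun k => List.replicate (L.count k) k)).Perm L := by
    rw [List.perm_iff_count]
    intro x
    rw [pvCount_flatMap_replicate ks _ hnd x]
    by_cases hx : x ∈ L
    · simp [hmemks, hx]
    · simp [hmemks, hx, List.count_eq_zero.2 hx]
  have hE : (ks.flatMap (fun k => List.replicate (L.count k) k)).Pairwise (fun a b => b ≤ a) :=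
    pvPairwise_flatMap_replicate ks _ hstrict
  have hS : (PySem.List.sorted L (fun x => x) true).Perm L := PySem.List.sorted_perm _ _ _
  have hSp : (PySem.List.sorted L (fun x => x) true).Pairwise (fun a b => b ≤ a) :=
    PySem.List.sorted_pairwise_rev _ _
  exact List.Perm.eq_of_pairwise (fun a b _ _ h1 h2 => le_antisymm h2 h1) hSp hE (hS.trans hpermE.symm)

-- ===== VERDICT (by name: the statement is the Claim_ definition above) =====
theorem compute_string_properties_spec : Claim_equal_compute_string_properties := by
  intro s _
  unfold Spec_compute_string_properties
  simp only [compute_string_properties, compute_string_properties_alt]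
  rw [pvA_loop_inv (s.toList.map (fun c => String.ofList [c])) [] 0 (by simp),
      PySem.Dict.foldl_insert_getD_add_one_eq_counter]
  simp only [List.nil_append, PySem.Dict.keys_counter, PySem.Dict.getD_counter,
    Int.toNat_natCast]
  refine congrArg _ (congrArg₂ _ ?_ ?_)
  · exact pvSorted_rev_eq_expand _
  · simp [PySem.Dict.size, PySem.Dict.items_counter]
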